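-- pv_equiv track=rewrite | github.com/sanjayb-28/ContainrLab | judge/labs/lab3.py | _extract_alias
-- ===== SOURCE A (Python) =====
-- def _extract_alias(from_instruction: str) -> str | None:
--     tokens = from_instruction.split()
--     lowered = [token.lower() for token in tokens]
--     if "as" in lowered:
--         index = lowered.index("as")
--         if index + 1 < len(tokens):
--             return tokens[index + 1]
--     return None
-- ===== SOURCE B (Python) =====
-- def _extract_alias(from_instruction: str) -> str | None:
--     ans = None
--     nxt = None
--     for tok in reversed(from_instruction.split()):
--         if tok.lower() == "as" and nxt is not None:
--             ans = nxt
--         nxt = tok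
--     return ans
-- ===== Notes on version B (the rewrite author's own statement) =====
-- stated objective: alternative
-- what changed: B traverses the token list right-to-left with a two-slot accumulator (answer-so-far and the following token), overwriting the answer at every keyword hit so the leftmost keyword wins, instead of A's staged build-lowered-list / membership test / .index / subscript lookup.
import Mathlib
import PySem

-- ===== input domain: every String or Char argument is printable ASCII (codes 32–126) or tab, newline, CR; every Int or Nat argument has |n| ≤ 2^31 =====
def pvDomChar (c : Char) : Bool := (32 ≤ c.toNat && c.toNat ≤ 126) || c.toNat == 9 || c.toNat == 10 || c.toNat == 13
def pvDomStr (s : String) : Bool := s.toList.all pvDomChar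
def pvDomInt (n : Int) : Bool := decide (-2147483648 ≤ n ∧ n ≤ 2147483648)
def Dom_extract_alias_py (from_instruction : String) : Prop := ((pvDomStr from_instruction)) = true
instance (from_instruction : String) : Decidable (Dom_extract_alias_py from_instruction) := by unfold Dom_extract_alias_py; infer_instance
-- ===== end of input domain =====

-- B replaces A's staged passes (lowered list, membership test, .index, subscript) with a single
-- right-to-left traversal carrying (answer-so-far, following token); objective: alternative.

-- ===== PORT A =====
def extract_alias_py (from_instruction : String) : Option String :=
  let tokens := PySem.Str.split₀ from_instruction
  let lowered := tokens.map (fun t => PySem.Str.lower t)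
  if lowered.contains "as" then
    match PySem.List.index? lowered "as" with
    | some index =>
        if index + 1 < tokens.length then PySem.List.pyGet? tokens ((index : Int) + 1)
        else none
    | none => none
  else none

-- ===== PORT B =====
-- fold over reversed(tokens): state = (ans, nxt); overwrite ans on every keyword hit,
-- so after the whole pass the leftmost 'as' determined the answer.
def extract_alias_py_alt (from_instruction : String) : Option String :=
  ((PySem.Str.split₀ from_instruction).reverse.foldl
    (fun (st : Option String × Option String) tok =>
      (if PySem.Str.lower tok = "as" ∧ st.2.isSome then st.2 else st.1, some tok))
    (none, none)).1

-- ===== PRECONDITION & SPEC =====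
def Spec_extract_alias_py (from_instruction : String) (out : Option String) : Prop := out = extract_alias_py_alt from_instruction
instance (from_instruction : String) (out : Option String) : Decidable (Spec_extract_alias_py from_instruction out) := by unfold Spec_extract_alias_py; infer_instance

-- ===== CLAIM (what is proved, stated in full; the proofs are below) =====
def Claim_equal_extract_alias_py : Prop := ∀ (from_instruction : String), Dom_extract_alias_py from_instruction → Spec_extract_alias_py from_instruction (extract_alias_py from_instruction)

-- ===== LEMMAS AND PROOFS =====

-- proof-only specification: token following the leftmost case-insensitive 'as'
def pvFirstAlias : List String → Option String
  | prev :: cur :: rest =>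
      if PySem.Str.lower prev = "as" then some cur else pvFirstAlias (cur :: rest)
  | _ => none

-- A computes pvFirstAlias
lemma pvA_eq (ts : List String) :
    (if (ts.map (fun t => PySem.Str.lower t)).contains "as" then
      match PySem.List.index? (ts.map (fun t => PySem.Str.lower t)) "as" with
      | some index =>
          if index + 1 < ts.length then PySem.List.pyGet? ts ((index : Int) + 1)
          else none
      | none => none
    else none) = pvFirstAlias ts := by
  induction ts with
  | nil => simp [pvFirstAlias]
  | cons a rest ih =>
    by_cases h : PySem.Str.lower a = "as"
    · rw [List.map_cons, h, PySem.List.index?_cons_self]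
      cases rest with
      | nil => simp [pvFirstAlias]
      | cons b r =>
        simp only [List.contains_cons, BEq.rfl, Bool.true_or, if_true]
        simp [pvFirstAlias, h, PySem.List.pyGet?, PySem.List.pyIdx?]
    · rw [List.map_cons, PySem.List.index?_cons_of_ne _ h]
      have hb : (("as" : String) == PySem.Str.lower a) = false :=
        beq_eq_false_iff_ne.mpr (Ne.symm h)
      have hc : ((PySem.Str.lower a :: rest.map (fun t => PySem.Str.lower t)).contains "as")
          = ((rest.map (fun t => PySem.Str.lower t)).contains "as") := by
        rw [List.contains_cons, hb, Bool.false_or]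
      rw [hc]
      have hscan : pvFirstAlias (a :: rest) = pvFirstAlias rest := by
        cases rest with
        | nil => simp [pvFirstAlias]
        | cons b r => simp [pvFirstAlias, h]
      rw [hscan, ← ih]
      by_cases hmem : ((rest.map (fun t => PySem.Str.lower t)).contains "as") = true
      · rw [if_pos hmem, if_pos hmem]
        cases hidx : PySem.List.index? (rest.map (fun t => PySem.Str.lower t)) "as" with
        | none => rfl
        | some i =>
          simp only [Option.map_some]
          have hlen : (i + 1 + 1 < (a :: rest).length) ↔ (i + 1 < rest.length) := by
            simp only [List.length_cons]; omega
          have hget : PySem.List.pyGet? (a :: rest) (((i + 1 : Nat) : Int) + 1)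
              = PySem.List.pyGet? rest ((i : Int) + 1) := by
            have := PySem.List.pyGet?_cons_succ (x := a) (xs := rest) (n := i + 1)
            rw [this]; norm_cast
          by_cases hlt : i + 1 < rest.length
          · rw [if_pos (hlen.mpr hlt), if_pos hlt, hget]
          · rw [if_neg (by omega), if_neg hlt]
      · rw [if_neg hmem, if_neg hmem]

-- B's right-to-left fold computes (pvFirstAlias ts, ts.head?)
lemma pvB_state (ts : List String) :
    ts.reverse.foldl
      (fun (st : Option String × Option String) tok =>
        (if PySem.Str.lower tok = "as" ∧ st.2.isSome then st.2 else st.1, some tok))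
      (none, none) = (pvFirstAlias ts, ts.head?) := by
  induction ts with
  | nil => simp [pvFirstAlias]
  | cons a rest ih =>
    rw [List.reverse_cons, List.foldl_append, ih]
    simp only [List.foldl_cons, List.foldl_nil]
    cases rest with
    | nil => simp [pvFirstAlias]
    | cons b r =>
      by_cases h : PySem.Str.lower a = "as" <;>
        simp [pvFirstAlias, h]

-- ===== VERDICT (by name: the statement is the Claim_ definition above) =====
theorem extract_alias_py_spec : Claim_equal_extract_alias_py := by
  intro s _
  unfold Spec_extract_alias_py extract_alias_py extract_alias_py_alt
  rw [pvB_state]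
  exact pvA_eq (PySem.Str.split₀ s)
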